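-- pv_equiv track=rewrite | github.com/danhill600/alien_invasion | ch8functions/8_9magicians.py | make_great
-- ===== SOURCE A (Python) =====
-- def make_great(magicians):
--     tempmagicians = []
--     while magicians:
--         current_magician = "The Great " + magicians.pop()
--         tempmagicians.append(current_magician)
--     while tempmagicians:
--        magicians.append(tempmagicians.pop())
--     return magicians
-- ===== SOURCE B (Python) =====
-- def make_great(magicians):
--     magicians[:] = ["The Great " + name for name in magicians]
--     return magicians
-- ===== Notes on version B (the rewrite author's own statement) =====
-- stated objective: simpler
-- what changed: Replaces the two-phase pop/append stack-reversal with a single-pass comprehension written back via slice assignment, keeping in-place mutation and the returned object identity.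
import Mathlib
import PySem

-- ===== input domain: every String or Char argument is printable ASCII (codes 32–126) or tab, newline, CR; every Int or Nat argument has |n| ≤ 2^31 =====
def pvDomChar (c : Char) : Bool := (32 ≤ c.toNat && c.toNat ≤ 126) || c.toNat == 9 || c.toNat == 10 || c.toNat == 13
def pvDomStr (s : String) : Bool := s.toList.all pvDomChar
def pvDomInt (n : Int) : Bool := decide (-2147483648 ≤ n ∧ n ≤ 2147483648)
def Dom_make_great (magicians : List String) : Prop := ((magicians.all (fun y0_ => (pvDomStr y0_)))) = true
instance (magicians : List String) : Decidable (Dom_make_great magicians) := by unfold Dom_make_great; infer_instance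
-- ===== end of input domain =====

-- B changes the two-phase pop/append stack-reversal into one map pass written back in place;
-- equivalence here is about the RETURN value (both Pythons mutate the argument list in place).

-- ===== PORT A =====
-- first while loop: pop from the end of `ms`, append prefixed name to `temp`
def mgLoop1 (ms temp : List String) : List String :=
  if ms = [] then temp
  else mgLoop1 ms.dropLast (temp ++ ["The Great " ++ ms.getLast!])
termination_by ms.length
decreasing_by
  have : ms.length ≠ 0 := by simpa [List.length_eq_zero_iff] using ‹¬ ms = []›
  simp [List.length_dropLast]; omega

-- second while loop: pop from the end of `temp`, append to `ms`
def mgLoop2 (temp ms : List String) : List String :=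
  if temp = [] then ms
  else mgLoop2 temp.dropLast (ms ++ [temp.getLast!])
termination_by temp.length
decreasing_by
  have : temp.length ≠ 0 := by simpa [List.length_eq_zero_iff] using ‹¬ temp = []›
  simp [List.length_dropLast]; omega

def make_great (magicians : List String) : List String :=
  mgLoop2 (mgLoop1 magicians []) []

-- ===== PORT B =====
def make_great_alt (magicians : List String) : List String :=
  magicians.map (fun name => "The Great " ++ name)

-- ===== PRECONDITION & SPEC =====
def Spec_make_great (magicians : List String) (out : List String) : Prop := out = make_great_alt magicians
instance (magicians : List String) (out : List String) : Decidable (Spec_make_great magicians out) := by unfold Spec_make_great; infer_instance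

-- ===== CLAIM (what is proved, stated in full; the proofs are below) =====
def Claim_equal_make_great : Prop := ∀ (magicians : List String), Dom_make_great magicians → Spec_make_great magicians (make_great magicians)

-- ===== LEMMAS AND PROOFS =====
theorem mgLoop1_eq (ms : List String) : ∀ temp,
    mgLoop1 ms temp = temp ++ (ms.map (fun n => "The Great " ++ n)).reverse := by
  induction ms using List.reverseRecOn with
  | nil => intro temp; simp [mgLoop1]
  | append_singleton xs x ih =>
      intro temp
      rw [mgLoop1]
      simp [List.getLast!_eq_getLast?_getD, ih]

theorem mgLoop2_eq (temp : List String) : ∀ ms,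
    mgLoop2 temp ms = ms ++ temp.reverse := by
  induction temp using List.reverseRecOn with
  | nil => intro ms; simp [mgLoop2]
  | append_singleton xs x ih =>
      intro ms
      rw [mgLoop2]
      simp [List.getLast!_eq_getLast?_getD, ih]

-- ===== VERDICT (by name: the statement is the Claim_ definition above) =====
theorem make_great_spec : Claim_equal_make_great := by
  intro magicians _
  unfold Spec_make_great make_great make_great_alt
  rw [mgLoop1_eq, mgLoop2_eq]
  simp
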